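-- pv_equiv track=rewrite | github.com/enragedginger/pants_backend_clojure | pants-plugins/clojure_backend/utils/source_roots.py | determine_source_root
-- ===== SOURCE A (Python) =====
-- def determine_source_root(file_path: str, namespace: str) -> str | None:
--     """Determine the source root directory for a Clojure file.
--
--     For a file like projects/foo/src/example/core.clj with namespace example.core,
--     the source root is projects/foo/src.
--
--     Args:
--         file_path: The path to the Clojure source file.
--         namespace: The namespace declared in the file.
--
--     Returns:
--         The source root directory, or None if the namespace can't be matched
--         to the file path.
--
--     Examples:
--         >>> determine_source_root("projects/foo/src/example/core.clj", "example.core")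
--         "projects/foo/src"
--
--         >>> determine_source_root("src/example/project_a/core.clj", "example.project-a.core")
--         "src"
--     """
--     # Convert namespace to expected path (example.project-a.core -> example/project_a/core)
--     expected_path_parts = namespace.replace(".", "/").replace("-", "_").split("/")
--
--     # Remove .clj/.cljc extension from file path
--     clean_path = file_path
--     if clean_path.endswith(".clj"):
--         clean_path = clean_path[:-4]
--     elif clean_path.endswith(".cljc"):
--         clean_path = clean_path[:-5]
--
--     # Split the file path into parts
--     path_parts = clean_path.split("/")
--
--     # Find where the namespace path starts in the file path
--     # e.g., projects/foo/src/example/core matches example/core at the end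
--     # Walk backwards from the file path, matching namespace components
--     for i in range(len(path_parts) - len(expected_path_parts), -1, -1):
--         if path_parts[i:] == expected_path_parts:
--             # Source root is everything before the namespace path
--             return "/".join(path_parts[:i]) if i > 0 else "."
--
--     # Fallback: use the directory containing the source file
--     return "/".join(file_path.split("/")[:-1]) if "/" in file_path else "."
-- ===== SOURCE B (Python) =====
-- def determine_source_root(file_path: str, namespace: str) -> str | None:
--     """String-level variant: never split the cleaned path into parts.
--
--     The namespace is converted to its expected path string; the match is a
--     whole-string equality or a '/'-boundary suffix test on the cleaned path,
--     and the source root is the prefix before that boundary.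
--     """
--     expected = namespace.replace(".", "/").replace("-", "_")
--
--     clean = file_path
--     if clean.endswith(".clj"):
--         clean = clean[:-4]
--     elif clean.endswith(".cljc"):
--         clean = clean[:-5]
--
--     if clean == expected:
--         return "."
--     if clean.endswith("/" + expected):
--         return clean[: len(clean) - len(expected) - 1]
--
--     return "/".join(file_path.split("/")[:-1]) if "/" in file_path else "."
-- ===== Notes on version B (the rewrite author's own statement) =====
-- stated objective: alternative
-- what changed: B never splits the cleaned path into parts: it converts the namespace to a single expected path string and matches by whole-string equality or a '/'-boundary endswith test, returning the string prefix before the boundary, instead of A's descending loop comparing list slices of path components.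
import Mathlib
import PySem

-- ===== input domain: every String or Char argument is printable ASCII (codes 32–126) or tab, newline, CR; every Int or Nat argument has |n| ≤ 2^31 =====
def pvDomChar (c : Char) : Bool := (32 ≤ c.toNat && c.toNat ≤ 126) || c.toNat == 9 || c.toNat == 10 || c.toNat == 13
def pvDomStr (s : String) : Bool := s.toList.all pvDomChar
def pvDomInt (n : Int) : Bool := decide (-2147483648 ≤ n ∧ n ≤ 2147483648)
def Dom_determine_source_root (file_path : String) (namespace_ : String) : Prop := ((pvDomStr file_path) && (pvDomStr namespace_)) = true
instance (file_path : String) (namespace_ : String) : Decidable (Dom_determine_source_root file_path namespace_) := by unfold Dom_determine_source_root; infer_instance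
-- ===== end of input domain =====

-- B never splits the cleaned path into parts: it matches the namespace's expected path string
-- by whole-string equality or a '/'-boundary endswith test instead of A's descending loop over
-- list slices of path components; same fallback. Objective: alternative (same cost, different algorithm).
set_option maxHeartbeats 1600000


-- ===== PORT A =====
-- s.split("/") (sep is the non-empty literal "/", so split? is always `some`)
def splitSlash (s : String) : List String := (PySem.Str.split? s "/").getD []

-- namespace.replace(".", "/").replace("-", "_").split("/")
def pvExpectedParts (namespace_ : String) : List String :=
  splitSlash (PySem.Str.replace (PySem.Str.replace namespace_ "." "/") "-" "_")

-- strip .clj/.cljc, then clean_path.split("/")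
def pvPathParts (file_path : String) : List String :=
  splitSlash
    (if PySem.Str.endswith file_path ".clj" then PySem.Str.slice file_path none (some (-4))
     else if PySem.Str.endswith file_path ".cljc" then PySem.Str.slice file_path none (some (-5))
     else file_path)

-- the common fallback line of both Pythons: "/".join(file_path.split("/")[:-1]) if "/" in file_path else "."
def pvFallback (file_path : String) : String :=
  if PySem.Str.isIn "/" file_path then
    PySem.Str.join "/" (PySem.List.slice (splitSlash file_path) none (some (-1)))
  else "."

-- the loop body of A: one iteration of `for i in range(...)` with its early return
def pvLoopBody (path_parts expected_path_parts : List String) (i : Int) : Option String :=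
  if PySem.List.slice path_parts (some i) none = expected_path_parts then
    some (if 0 < i then PySem.Str.join "/" (PySem.List.slice path_parts none (some i)) else ".")
  else none

def determine_source_root (file_path : String) (namespace_ : String) : Option String :=
  match (PySem.List.pyRange (((pvPathParts file_path).length : Int) - ((pvExpectedParts namespace_).length : Int)) (-1) (-1)).findSome?
      (pvLoopBody (pvPathParts file_path) (pvExpectedParts namespace_)) with
  | some r => some r
  | none => some (pvFallback file_path)

-- ===== PORT B =====
-- expected = namespace.replace(".", "/").replace("-", "_")   (one string, never split)
def pvExpectedStr (namespace_ : String) : String :=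
  PySem.Str.replace (PySem.Str.replace namespace_ "." "/") "-" "_"

-- clean = file_path with .clj/.cljc stripped
def pvCleanStr (file_path : String) : String :=
  if PySem.Str.endswith file_path ".clj" then PySem.Str.slice file_path none (some (-4))
  else if PySem.Str.endswith file_path ".cljc" then PySem.Str.slice file_path none (some (-5))
  else file_path

def determine_source_root_alt (file_path : String) (namespace_ : String) : Option String :=
  if pvCleanStr file_path = pvExpectedStr namespace_ then some "."
  else if PySem.Str.endswith (pvCleanStr file_path) ("/" ++ pvExpectedStr namespace_) then
    -- clean[: len(clean) - len(expected) - 1]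
    some (PySem.Str.slice (pvCleanStr file_path) none
      (some (PySem.Str.len (pvCleanStr file_path) - PySem.Str.len (pvExpectedStr namespace_) - 1)))
  else some (pvFallback file_path)

-- ===== PRECONDITION & SPEC =====
def Spec_determine_source_root (file_path : String) (namespace_ : String) (out : Option String) : Prop := out = determine_source_root_alt file_path namespace_
instance (file_path : String) (namespace_ : String) (out : Option String) : Decidable (Spec_determine_source_root file_path namespace_ out) := by unfold Spec_determine_source_root; infer_instance

-- ===== CLAIM (what is proved, stated in full; the proofs are below) =====
def Claim_equal_determine_source_root : Prop := ∀ (file_path : String) (namespace_ : String), Dom_determine_source_root file_path namespace_ → Spec_determine_source_root file_path namespace_ (determine_source_root file_path namespace_)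

-- ===== LEMMAS AND PROOFS =====

-- A's whole loop equals the single boundary-aligned suffix test: a slice path_parts[i:]
-- can only equal expected_path_parts when the lengths match.
lemma loop_eq_suffix_test (parts expected : List String) :
    (PySem.List.pyRange ((parts.length : Int) - (expected.length : Int)) (-1) (-1)).findSome?
      (pvLoopBody parts expected)
    = (if 0 ≤ ((parts.length : Int) - (expected.length : Int)) ∧
          PySem.List.slice parts (some ((parts.length : Int) - (expected.length : Int))) none = expected
       then some (if 0 < ((parts.length : Int) - (expected.length : Int)) then
                    PySem.Str.join "/" (PySem.List.slice parts none (some ((parts.length : Int) - (expected.length : Int)))) else ".")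
       else none) := by
  set s : Int := (parts.length : Int) - (expected.length : Int) with hs
  by_cases h0 : 0 ≤ s
  · rw [PySem.List.pyRange_neg_one_cons (by omega : (-1 : Int) < s)]
    by_cases hm : PySem.List.slice parts (some s) none = expected
    · simp [List.findSome?, pvLoopBody, hm, h0]
    · have hrest : (PySem.List.pyRange (s - 1) (-1) (-1)).findSome? (pvLoopBody parts expected) = none := by
        apply List.findSome?_eq_none_iff.mpr
        intro i hi
        rw [PySem.List.mem_pyRange_neg_one] at hi
        have hi0 : 0 ≤ i := by omega
        unfold pvLoopBody
        rw [if_neg]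
        intro hEq
        have hlen := congrArg List.length hEq
        rw [PySem.List.slice_from parts hi0] at hlen
        simp [List.length_drop] at hlen
        omega
      simp [List.findSome?, pvLoopBody, hm, hrest]
  · rw [PySem.List.pyRange_neg_one_eq_nil (by omega : s ≤ -1)]
    simp [h0]

-- simple structural recursion computing split-by-'/' (proof-side characterisation of splitOn)
def splitC : List Char → List (List Char)
  | [] => [[]]
  | c :: t =>
    if c = '/' then [] :: splitC t
    else match splitC t with
      | [] => [[c]]
      | p :: ps => (c :: p) :: ps

lemma splitC_ne_nil (c : List Char) : splitC c ≠ [] := by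
  cases c with
  | nil => simp [splitC]
  | cons a t =>
    simp only [splitC]
    split_ifs
    · simp
    · cases h : splitC t <;> simp

-- prepend to the head part (what an accumulated `cur` contributes)
def consHead (x : List Char) : List (List Char) → List (List Char)
  | [] => [x]
  | p :: ps => (x ++ p) :: ps

lemma splitOn_go_eq (l : List Char) : ∀ (fuel : Nat) (cur : List Char) (acc : List (List Char)),
    l.length ≤ fuel →
    PySem.Chars.splitOn.go ['/'] fuel l cur acc = acc.reverse ++ consHead cur.reverse (splitC l) := by
  induction l with
  | nil =>
    intro fuel cur acc _
    cases fuel <;> simp [PySem.Chars.splitOn.go, splitC, consHead]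
  | cons c rest ih =>
    intro fuel cur acc hf
    cases fuel with
    | zero => simp at hf
    | succ f =>
      rw [PySem.Chars.splitOn.go]
      by_cases hc : c = '/'
      · subst hc
        have hpre : ['/'].isPrefixOf ('/' :: rest) = true := by simp [List.isPrefixOf]
        simp only [hpre, if_pos]
        have hdrop : List.drop (['/'] : List Char).length ('/' :: rest) = rest := rfl
        rw [hdrop, ih f [] (cur.reverse :: acc) (by simpa using hf)]
        simp only [splitC]
        cases h : splitC rest with
        | nil => exact absurd h (splitC_ne_nil rest)
        | cons p ps => simp [consHead]
      · have hpre : ['/'].isPrefixOf (c :: rest) = false := by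
          simp [List.isPrefixOf]
          intro h; exact absurd h.symm hc
        simp only [hpre]
        rw [if_neg (by simp)]
        rw [ih f (c :: cur) acc (by simpa using hf)]
        simp only [splitC, if_neg hc]
        cases h : splitC rest with
        | nil => exact absurd h (splitC_ne_nil rest)
        | cons p ps => simp [consHead]

lemma splitOn_slash (c : List Char) : PySem.Chars.splitOn c ['/'] = splitC c := by
  unfold PySem.Chars.splitOn
  rw [splitOn_go_eq c (c.length + 1) [] [] (by omega)]
  cases h : splitC c with
  | nil => exact absurd h (splitC_ne_nil c)
  | cons p ps => simp [consHead]

lemma join_cons_head (sep c : List Char) (p : List Char) (ps : List (List Char)) :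
    PySem.Chars.join sep ((c ++ p) :: ps) = c ++ PySem.Chars.join sep (p :: ps) := by
  cases ps with
  | nil => simp [PySem.Chars.join_singleton]
  | cons q qs => rw [PySem.Chars.join_cons_cons, PySem.Chars.join_cons_cons]; simp

lemma join_splitC (c : List Char) : PySem.Chars.join ['/'] (splitC c) = c := by
  induction c with
  | nil => simp [splitC, PySem.Chars.join_singleton]
  | cons a t ih =>
    simp only [splitC]
    by_cases ha : a = '/'
    · subst ha
      rw [if_pos rfl]
      cases h : splitC t with
      | nil => exact absurd h (splitC_ne_nil t)
      | cons p ps =>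
        rw [PySem.Chars.join_cons_cons]
        rw [h] at ih
        simp [ih]
    · rw [if_neg ha]
      cases h : splitC t with
      | nil => exact absurd h (splitC_ne_nil t)
      | cons p ps =>
        have : PySem.Chars.join ['/'] (((a :: p)) :: ps) = [a] ++ PySem.Chars.join ['/'] (p :: ps) := by
          simpa using join_cons_head ['/'] [a] p ps
        rw [this]
        rw [h] at ih
        simp [ih]

lemma splitC_append (u v : List Char) : splitC (u ++ '/' :: v) = splitC u ++ splitC v := by
  induction u with
  | nil => simp [splitC]
  | cons a t ih =>
    by_cases ha : a = '/'
    · subst ha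
      simp [List.cons_append, splitC, ih]
    · simp only [List.cons_append, splitC, if_neg ha, ih]
      cases h : splitC t with
      | nil => exact absurd h (splitC_ne_nil t)
      | cons p ps => simp

lemma join_append_of_ne_nil (sep : List Char) (as bs : List (List Char))
    (ha : as ≠ []) (hb : bs ≠ []) :
    PySem.Chars.join sep (as ++ bs) = PySem.Chars.join sep as ++ sep ++ PySem.Chars.join sep bs := by
  induction as with
  | nil => exact absurd rfl ha
  | cons p ps ih =>
    cases ps with
    | nil =>
      cases bs with
      | nil => exact absurd rfl hb
      | cons q qs => simp [PySem.Chars.join_singleton, PySem.Chars.join_cons_cons]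
    | cons p' ps' =>
      have h1 := ih (by simp)
      simp only [List.cons_append] at h1 ⊢
      rw [PySem.Chars.join_cons_cons, h1, PySem.Chars.join_cons_cons]
      simp

-- the two ports' preprocessing, expressed through splitC
lemma pathParts_eq (fp : String) :
    pvPathParts fp = (splitC (pvCleanStr fp).toList).map String.ofList := by
  unfold pvPathParts pvCleanStr splitSlash
  simp only [PySem.Str.split?, show ("/" : String).toList = ['/'] from rfl, PySem.Chars.split?]
  split_ifs <;> simp_all [splitOn_slash]

lemma expectedParts_eq (ns : String) :
    pvExpectedParts ns = (splitC (pvExpectedStr ns).toList).map String.ofList := by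
  unfold pvExpectedParts pvExpectedStr splitSlash
  simp [PySem.Str.split?, show ("/" : String).toList = ['/'] from rfl, PySem.Chars.split?,
    splitOn_slash]

-- String "/"-join of ofList parts, back on the char side
lemma strJoin_map_ofList (L : List (List Char)) :
    PySem.Str.join "/" (L.map String.ofList) = String.ofList (PySem.Chars.join ['/'] L) := by
  apply String.toList_inj.mp
  simp [PySem.Str.join, show ("/" : String).toList = ['/'] from rfl, List.map_map,
    Function.comp_def]

-- ofList is injective (toList is its left inverse)
lemma ofList_inj {a b : List Char} (h : String.ofList a = String.ofList b) : a = b := by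
  have := congrArg String.toList h
  simpa using this

lemma map_ofList_inj : ∀ {X Y : List (List Char)},
    X.map String.ofList = Y.map String.ofList → X = Y := by
  intro X
  induction X with
  | nil => intro Y h; cases Y <;> simp_all
  | cons x xs ih =>
    intro Y h
    cases Y with
    | nil => simp at h
    | cons y ys =>
      simp only [List.map_cons, List.cons.injEq] at h
      exact by rw [ofList_inj h.1, ih h.2]

-- the core equivalence, stated on the two cleaned/expected strings
lemma core_eq (fp ns : String) :
    (if 0 ≤ (((pvPathParts fp).length : Int) - ((pvExpectedParts ns).length : Int)) ∧
        PySem.List.slice (pvPathParts fp)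
          (some (((pvPathParts fp).length : Int) - ((pvExpectedParts ns).length : Int))) none
          = pvExpectedParts ns
     then some (if 0 < (((pvPathParts fp).length : Int) - ((pvExpectedParts ns).length : Int)) then
            PySem.Str.join "/" (PySem.List.slice (pvPathParts fp) none
              (some (((pvPathParts fp).length : Int) - ((pvExpectedParts ns).length : Int))))
          else ".")
     else none)
    = (if pvCleanStr fp = pvExpectedStr ns then some "." else
       if PySem.Str.endswith (pvCleanStr fp) ("/" ++ pvExpectedStr ns) = true then
         some (PySem.Str.slice (pvCleanStr fp) none
           (some (PySem.Str.len (pvCleanStr fp) - PySem.Str.len (pvExpectedStr ns) - 1)))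
       else none) := by
  have hP := pathParts_eq fp
  have hE := expectedParts_eq ns
  have hlenP : (pvPathParts fp).length = (splitC (pvCleanStr fp).toList).length := by
    rw [hP]; simp
  have hlenE : (pvExpectedParts ns).length = (splitC (pvExpectedStr ns).toList).length := by
    rw [hE]; simp
  have hsufList : PySem.Str.endswith (pvCleanStr fp) ("/" ++ pvExpectedStr ns) = true ↔
      ('/' :: (pvExpectedStr ns).toList) <:+ (pvCleanStr fp).toList := by
    rw [PySem.Str.endswith_eq, String.toList_append,
      show ("/" : String).toList = ['/'] from rfl]
    exact PySem.Chars.endswith_iff _ _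
  by_cases hce : pvCleanStr fp = pvExpectedStr ns
  · -- whole-string match: the boundary index is 0 and A returns "."
    have hpe : pvPathParts fp = pvExpectedParts ns := by rw [hP, hE, hce]
    have hk0 : ((pvPathParts fp).length : Int) - ((pvExpectedParts ns).length : Int) = 0 := by
      rw [hpe]; omega
    rw [hk0]
    rw [if_pos ⟨le_refl 0, by rw [PySem.List.slice_from _ (le_refl 0)]; simpa using hpe⟩]
    rw [if_pos hce, if_neg (lt_irrefl 0)]
  · by_cases hsuf : PySem.Str.endswith (pvCleanStr fp) ("/" ++ pvExpectedStr ns) = true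
    · -- '/'-boundary suffix match
      obtain ⟨u, hu⟩ := hsufList.mp hsuf
      set C := (pvCleanStr fp).toList with hC
      set E := (pvExpectedStr ns).toList with hEdef
      have hsplitC : splitC C = splitC u ++ splitC E := by
        rw [← hu]; exact splitC_append u E
      have hune : splitC u ≠ [] := splitC_ne_nil u
      have hupos : 0 < (splitC u).length := List.length_pos_iff.mpr hune
      have hk : (((pvPathParts fp).length : Int) - ((pvExpectedParts ns).length : Int))
          = ((splitC u).length : Int) := by
        rw [hlenP, hlenE, hsplitC, List.length_append]; push_cast; ring
      rw [hk]
      have hkn : ((splitC u).length : Int).toNat = (splitC u).length := by omega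
      have hcond : PySem.List.slice (pvPathParts fp) (some ((splitC u).length : Int)) none
          = pvExpectedParts ns := by
        rw [PySem.List.slice_from _ (Int.natCast_nonneg _), hkn, hP, hE, hsplitC, List.map_append]
        rw [show (splitC u).length = (List.map String.ofList (splitC u)).length by simp]
        rw [List.drop_left]
      rw [if_pos ⟨Int.natCast_nonneg _, hcond⟩, if_neg hce, if_pos hsuf,
        if_pos (by exact_mod_cast hupos)]
      -- both sides compute the prefix u before the boundary
      have htake : PySem.List.slice (pvPathParts fp) none (some ((splitC u).length : Int))
          = (splitC u).map String.ofList := by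
        rw [PySem.List.slice_to _ (Int.natCast_nonneg _), hkn, hP, hsplitC, List.map_append]
        rw [show (splitC u).length = (List.map String.ofList (splitC u)).length by simp]
        rw [List.take_left]
      rw [htake, strJoin_map_ofList, join_splitC]
      refine congrArg some (String.toList_inj.mp ?_)
      have hlenC : C.length = u.length + 1 + E.length := by
        rw [← hu]; simp; omega
      have hb : PySem.Str.len (pvCleanStr fp) - PySem.Str.len (pvExpectedStr ns) - 1
          = (u.length : Int) := by
        simp only [PySem.Str.len, ← hC, ← hEdef, hlenC]; push_cast; ring
      rw [PySem.Str.toList_slice, hb, String.toList_ofList, PySem.Chars.slice_eq_listSlice,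
        PySem.List.slice_to _ (Int.natCast_nonneg _), ← hC, ← hu]
      simp
    · -- no match on either side: A's single slice test must fail too
      rw [if_neg, if_neg hce, if_neg hsuf]
      rintro ⟨hk0, hsl⟩
      set C := (pvCleanStr fp).toList with hC
      set E := (pvExpectedStr ns).toList with hEdef
      rw [PySem.List.slice_from _ hk0, hP, hE] at hsl
      rw [← List.map_drop] at hsl
      have hdropC := map_ofList_inj hsl
      simp only [List.length_map] at hdropC
      have hk0' : (splitC E).length ≤ (splitC C).length := by
        rw [hlenP, hlenE] at hk0; omega
      have hdn : ((((splitC C).length : Int) - ((splitC E).length : Int))).toNat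
          = (splitC C).length - (splitC E).length := by omega
      rw [hdn] at hdropC
      set d : Nat := (splitC C).length - (splitC E).length with hd
      rcases Nat.eq_zero_or_pos d with hd0 | hdpos
      · -- d = 0: the parts lists coincide, so the strings do — contradiction with hce
        rw [hd0, List.drop_zero] at hdropC
        have : C = E := by
          rw [← join_splitC C, ← join_splitC E, hdropC]
        exact hce (String.toList_inj.mp this)
      · -- d > 0: C decomposes as (prefix ++ '/' :: E), contradicting ¬ endswith
        have hsplit : splitC C = (splitC C).take d ++ splitC E := by
          conv_lhs => rw [← List.take_append_drop d (splitC C)]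
          rw [hdropC]
        have htne : (splitC C).take d ≠ [] := by
          have hlt : ((splitC C).take d).length = d := by
            rw [List.length_take]; omega
          intro h
          rw [h] at hlt
          simp at hlt
          omega
        have hjoin : C = PySem.Chars.join ['/'] ((splitC C).take d) ++ ['/'] ++ E := by
          conv_lhs => rw [← join_splitC C, hsplit]
          rw [join_append_of_ne_nil _ _ _ htne (splitC_ne_nil E), join_splitC]
        apply hsuf
        apply hsufList.mpr
        refine ⟨PySem.Chars.join ['/'] ((splitC C).take d), ?_⟩
        conv_rhs => rw [hjoin]
        simp

-- ===== VERDICT (by name: the statement is the Claim_ definition above) =====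
theorem determine_source_root_spec : Claim_equal_determine_source_root := by
  intro fp ns _
  unfold Spec_determine_source_root determine_source_root determine_source_root_alt
  rw [loop_eq_suffix_test, core_eq fp ns]
  split_ifs <;> rfl
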